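-- pv_equiv track=rewrite | github.com/colourlessGreenIdeas/paperpal | md_to_pdf.py | preprocess_tables
-- ===== SOURCE A (Python) =====
-- def preprocess_tables(content):
--     """
--     Preprocess markdown tables to ensure they are properly formatted.
--     """
--     lines = content.split('\n')
--     processed_lines = []
--     in_table = False
--
--     for i, line in enumerate(lines):
--         # Check if this line might be part of a table
--         if '|' in line:
--             stripped = line.strip()
--             if not in_table:
--                 # If this is a potential table start, add a blank line before if needed
--                 if processed_lines and processed_lines[-1].strip():
--                     processed_lines.append('')
--                 in_table = True
--
--             # Clean up the table row
--             cells = [cell.strip() for cell in stripped.split('|')]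
--             # Remove empty cells from start/end
--             if not cells[0]: cells = cells[1:]
--             if not cells[-1]: cells = cells[:-1]
--
--             # Format the row properly
--             processed_line = '| ' + ' | '.join(cells) + ' |'
--
--             # If this is a separator row (contains ---)
--             if all(cell.replace('-', '').replace(':', '').strip() == '' for cell in cells):
--                 # Ensure each cell has at least 3 dashes
--                 cells = [':---:' if ':' in cell else '---' for cell in cells]
--                 processed_line = '| ' + ' | '.join(cells) + ' |'
--
--             processed_lines.append(processed_line)
--         else:
--             if in_table and stripped:
--                 # Add blank line after table
--                 processed_lines.append('')
--             in_table = False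
--             processed_lines.append(line)
--
--     return '\n'.join(processed_lines)
-- ===== SOURCE B (Python) =====
-- def _format_row(line):
--     stripped = line.strip()
--     cells = [cell.strip() for cell in stripped.split('|')]
--     if not cells[0]: cells = cells[1:]
--     if not cells[-1]: cells = cells[:-1]
--     if all(cell.replace('-', '').replace(':', '').strip() == '' for cell in cells):
--         cells = [':---:' if ':' in cell else '---' for cell in cells]
--     return '| ' + ' | '.join(cells) + ' |'
--
--
-- def preprocess_tables(content):
--     """
--     Preprocess markdown tables to ensure they are properly formatted.
--     """
--     lines = content.split('\n')
--     out = []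
--     i = 0
--     n = len(lines)
--     while i < n:
--         if '|' in lines[i]:
--             # maximal run of consecutive table lines
--             j = i
--             while j < n and '|' in lines[j]:
--                 j += 1
--             if out and out[-1].strip():
--                 out.append('')
--             out.extend(_format_row(lines[k]) for k in range(i, j))
--             if j < n:
--                 out.append('')
--             i = j
--         else:
--             out.append(lines[i])
--             i += 1
--     return '\n'.join(out)
-- ===== Notes on version B (the rewrite author's own statement) =====
-- stated objective: alternative
-- what changed: Replaces A's single stateful line-by-line pass (in_table flag plus a leftover 'stripped' variable driving blank insertion) with an index scan that partitions lines into maximal runs of '|'-lines and processes each table block as a unit via a _format_row helper, padding before the block and after it iff it ends before EOF.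
import Mathlib
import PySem

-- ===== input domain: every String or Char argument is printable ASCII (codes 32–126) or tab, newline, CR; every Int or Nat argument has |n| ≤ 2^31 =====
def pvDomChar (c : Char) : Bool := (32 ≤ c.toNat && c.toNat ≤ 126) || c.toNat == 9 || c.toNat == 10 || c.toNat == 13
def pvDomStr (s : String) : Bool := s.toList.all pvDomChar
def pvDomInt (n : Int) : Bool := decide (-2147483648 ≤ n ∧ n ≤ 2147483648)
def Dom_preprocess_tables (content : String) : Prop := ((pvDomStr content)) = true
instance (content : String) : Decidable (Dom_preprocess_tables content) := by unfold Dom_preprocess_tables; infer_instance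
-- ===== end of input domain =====

-- B replaces A's stateful line-by-line pass (in_table flag + leftover `stripped`) by a scan over
-- maximal runs of '|'-lines, handling each table block as a unit (objective: alternative decomposition).

-- ===== PORT A =====
-- shared tiny helper: '|' in line
def pvHasBar (l : List Char) : Bool := PySem.Chars.isIn ['|'] l

-- the body of A's for-loop, step for step; state = (processed_lines, in_table, stripped).
-- Python's `stripped` is an ordinary variable left over from earlier iterations; it is only ever
-- read when in_table is true, at which point it was assigned, so the initial [] is never read.
def pvStepA (st : List (List Char) × Bool × List Char) (line : List Char) :
    List (List Char) × Bool × List Char :=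
  let processed := st.1
  let in_table := st.2.1
  let stripped := st.2.2
  if pvHasBar line = true then
    let stripped := PySem.Chars.strip line
    let processed :=
      if in_table = false then
        if processed ≠ [] ∧ PySem.Chars.strip (PySem.List.pyGetD processed (-1) []) ≠ [] then
          processed ++ [[]]
        else processed
      else processed
    let cells := (PySem.Chars.splitOn stripped ['|']).map PySem.Chars.strip
    let cells := if PySem.List.pyGetD cells 0 [] = [] then PySem.List.slice cells (some 1) none else cells
    let cells := if PySem.List.pyGetD cells (-1) [] = [] then PySem.List.slice cells none (some (-1)) else cells
    let processed_line := ['|', ' '] ++ PySem.Chars.join [' ', '|', ' '] cells ++ [' ', '|']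
    let processed_line :=
      if cells.all (fun c =>
          PySem.Chars.strip (PySem.Chars.replace (PySem.Chars.replace c ['-'] []) [':'] []) == []) then
        let cells := cells.map (fun c =>
          if PySem.Chars.isIn [':'] c then [':', '-', '-', '-', ':'] else ['-', '-', '-'])
        ['|', ' '] ++ PySem.Chars.join [' ', '|', ' '] cells ++ [' ', '|']
      else processed_line
    (processed ++ [processed_line], true, stripped)
  else
    let processed := if in_table = true ∧ stripped ≠ [] then processed ++ [[]] else processed
    (processed ++ [line], false, stripped)

def preprocess_tables (content : String) : String :=
  let lines := PySem.Chars.splitOn content.toList ['\n']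
  String.ofList (PySem.Chars.join ['\n'] (lines.foldl pvStepA ([], false, [])).1)

-- ===== PORT B =====
-- Source B's _format_row
def pvFmtRow (line : List Char) : List Char :=
  let stripped := PySem.Chars.strip line
  let cells := (PySem.Chars.splitOn stripped ['|']).map PySem.Chars.strip
  let cells := if PySem.List.pyGetD cells 0 [] = [] then PySem.List.slice cells (some 1) none else cells
  let cells := if PySem.List.pyGetD cells (-1) [] = [] then PySem.List.slice cells none (some (-1)) else cells
  if cells.all (fun c =>
      PySem.Chars.strip (PySem.Chars.replace (PySem.Chars.replace c ['-'] []) [':'] []) == []) then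
    let cells := cells.map (fun c =>
      if PySem.Chars.isIn [':'] c then [':', '-', '-', '-', ':'] else ['-', '-', '-'])
    ['|', ' '] ++ PySem.Chars.join [' ', '|', ' '] cells ++ [' ', '|']
  else
    ['|', ' '] ++ PySem.Chars.join [' ', '|', ' '] cells ++ [' ', '|']

-- Source B's while-loop: consume a maximal run of table lines at a time
def pvLoopB (out : List (List Char)) (lines : List (List Char)) : List (List Char) :=
  match lines with
  | [] => out
  | l :: ls =>
    if h : pvHasBar l = true then
      let block := List.takeWhile pvHasBar (l :: ls)
      let rest := List.dropWhile pvHasBar (l :: ls)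
      let out1 :=
        if out ≠ [] ∧ PySem.Chars.strip (PySem.List.pyGetD out (-1) []) ≠ [] then out ++ [[]]
        else out
      let out2 := out1 ++ block.map pvFmtRow
      let out3 := if rest ≠ [] then out2 ++ [[]] else out2
      pvLoopB out3 rest
    else
      pvLoopB (out ++ [l]) ls
termination_by lines.length
decreasing_by
  · simp only [List.dropWhile_cons, h, if_pos, List.length_cons]
    have := List.length_dropWhile_le pvHasBar ls
    omega
  · simp

def preprocess_tables_alt (content : String) : String :=
  let lines := PySem.Chars.splitOn content.toList ['\n']
  String.ofList (PySem.Chars.join ['\n'] (pvLoopB [] lines))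

-- ===== PRECONDITION & SPEC =====
def Spec_preprocess_tables (content : String) (out : String) : Prop := out = preprocess_tables_alt content
instance (content : String) (out : String) : Decidable (Spec_preprocess_tables content out) := by unfold Spec_preprocess_tables; infer_instance

-- ===== CLAIM (what is proved, stated in full; the proofs are below) =====
def Claim_equal_preprocess_tables : Prop := ∀ (content : String), Dom_preprocess_tables content → Spec_preprocess_tables content (preprocess_tables content)

-- ===== LEMMAS AND PROOFS =====

-- a non-whitespace member survives dropWhile isspace
theorem pv_mem_dropWhile {x : Char} {l : List Char}
    (hx : x ∈ l) (hp : PySem.Chars.isspace x = false) :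
    x ∈ List.dropWhile PySem.Chars.isspace l := by
  induction l with
  | nil => cases hx
  | cons a t ih =>
    by_cases ha : PySem.Chars.isspace a = true
    · rw [List.dropWhile_cons_of_pos ha]
      rcases List.mem_cons.mp hx with rfl | hxt
      · rw [hp] at ha; cases ha
      · exact ih hxt
    · rw [List.dropWhile_cons_of_neg ha]
      exact hx

-- a line containing '|' has a non-empty strip
theorem pv_strip_ne_nil {line : List Char} (h : pvHasBar line = true) :
    PySem.Chars.strip line ≠ [] := by
  have hmem : '|' ∈ line := by
    have hinf := (PySem.Chars.isIn_iff_infix ['|'] line).mp h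
    exact List.singleton_sublist.mp hinf.sublist
  have hsp : PySem.Chars.isspace '|' = false := by decide
  have h1 : '|' ∈ PySem.Chars.lstrip line := pv_mem_dropWhile hmem hsp
  have h2 : '|' ∈ PySem.Chars.strip line := by
    unfold PySem.Chars.strip PySem.Chars.rstrip
    rw [List.mem_reverse]
    exact pv_mem_dropWhile (List.mem_reverse.mpr h1) hsp
  exact List.ne_nil_of_mem h2

-- A's inline row formatting is B's _format_row
theorem pv_stepA_bar (processed : List (List Char)) (in_table : Bool) (stripped line : List Char)
    (h : pvHasBar line = true) :
    pvStepA (processed, in_table, stripped) line =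
      ((if in_table = false then
          if processed ≠ [] ∧ PySem.Chars.strip (PySem.List.pyGetD processed (-1) []) ≠ [] then
            processed ++ [[]]
          else processed
        else processed) ++ [pvFmtRow line], true, PySem.Chars.strip line) := by
  simp only [pvStepA, pvFmtRow, h, if_pos]

-- B's continuation when A is mid-table-block
def pvContA (out : List (List Char)) (lines : List (List Char)) : List (List Char) :=
  let rest := List.dropWhile pvHasBar lines
  let out2 := out ++ (List.takeWhile pvHasBar lines).map pvFmtRow
  pvLoopB (if rest ≠ [] then out2 ++ [[]] else out2) rest

-- one-step unfoldings of pvLoopB / pvContA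
theorem pvLoopB_nil (out : List (List Char)) : pvLoopB out [] = out := by
  rw [pvLoopB]

theorem pvLoopB_cons_neg {l : List Char} {ls : List (List Char)} (out : List (List Char))
    (h : pvHasBar l = false) : pvLoopB out (l :: ls) = pvLoopB (out ++ [l]) ls := by
  rw [pvLoopB]; simp [h]

theorem pvLoopB_cons_pos {l : List Char} {ls : List (List Char)} (out : List (List Char))
    (h : pvHasBar l = true) :
    pvLoopB out (l :: ls) =
      pvContA (if out ≠ [] ∧ PySem.Chars.strip (PySem.List.pyGetD out (-1) []) ≠ [] then
          out ++ [[]] else out) (l :: ls) := by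
  rw [pvLoopB]; simp [h, pvContA]

theorem pvContA_nil (out : List (List Char)) : pvContA out [] = out := by
  simp [pvContA, pvLoopB_nil]

theorem pvContA_cons_pos {l : List Char} {ls : List (List Char)} (out : List (List Char))
    (h : pvHasBar l = true) :
    pvContA out (l :: ls) = pvContA (out ++ [pvFmtRow l]) ls := by
  simp [pvContA, List.takeWhile_cons_of_pos h, List.dropWhile_cons_of_pos h]

theorem pvContA_cons_neg {l : List Char} {ls : List (List Char)} (out : List (List Char))
    (h : pvHasBar l = false) :
    pvContA out (l :: ls) = pvLoopB ((out ++ [[]]) ++ [l]) ls := by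
  have h' : ¬ pvHasBar l = true := by simp [h]
  simp only [pvContA, List.takeWhile_cons_of_neg h', List.dropWhile_cons_of_neg h',
    List.map_nil, List.append_nil]
  rw [if_pos (by simp : (l :: ls : List (List Char)) ≠ []), pvLoopB_cons_neg _ h]

theorem pv_main (lines : List (List Char)) :
    (∀ out s, (List.foldl pvStepA (out, false, s) lines).1 = pvLoopB out lines) ∧
    (∀ out s, s ≠ [] → (List.foldl pvStepA (out, true, s) lines).1 = pvContA out lines) := by
  induction lines with
  | nil =>
    constructor
    · intro out s; rw [List.foldl_nil, pvLoopB_nil]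
    · intro out s _; rw [List.foldl_nil, pvContA_nil]
  | cons l ls ih =>
    obtain ⟨ihP, ihQ⟩ := ih
    by_cases h : pvHasBar l = true
    · constructor
      · intro out s
        rw [List.foldl_cons, pv_stepA_bar out false s l h]
        simp only [reduceIte]
        rw [ihQ _ _ (pv_strip_ne_nil h), pvLoopB_cons_pos out h, pvContA_cons_pos _ h]
      · intro out s hs
        rw [List.foldl_cons, pv_stepA_bar out true s l h]
        simp only [Bool.true_eq_false, if_false]
        rw [ihQ _ _ (pv_strip_ne_nil h), pvContA_cons_pos out h]
    · have h' : pvHasBar l = false := by simpa using h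
      constructor
      · intro out s
        rw [List.foldl_cons]
        have hstep : pvStepA (out, false, s) l = (out ++ [l], false, s) := by
          simp [pvStepA, h']
        rw [hstep, ihP, pvLoopB_cons_neg out h']
      · intro out s hs
        rw [List.foldl_cons]
        have hstep : pvStepA (out, true, s) l = ((out ++ [[]]) ++ [l], false, s) := by
          simp [pvStepA, h', hs]
        rw [hstep, ihP, pvContA_cons_neg out h']

-- ===== VERDICT (by name: the statement is the Claim_ definition above) =====
theorem preprocess_tables_spec : Claim_equal_preprocess_tables := by
  intro content _
  unfold Spec_preprocess_tables
  show String.ofList (PySem.Chars.join ['\n']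
      (List.foldl pvStepA ([], false, []) (PySem.Chars.splitOn content.toList ['\n'])).1)
    = String.ofList (PySem.Chars.join ['\n']
      (pvLoopB [] (PySem.Chars.splitOn content.toList ['\n'])))
  rw [(pv_main (PySem.Chars.splitOn content.toList ['\n'])).1 [] []]
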